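-- pv_equiv track=rewrite | github.com/MrBrantCode/unitest_baseline | mut_generate/mist_train_cf/cf_56947/solution.py | dominant_character_robust
-- ===== SOURCE A (Python) =====
-- from collections import OrderedDict
--
-- def dominant_character_robust(string: str, k: int) -> str:
--     result = "None"
--     minimum_count = len(string) // k
--     char_count = OrderedDict()
--
--     for char in string:
--         if char in char_count:
--             char_count[char] += 1
--         else:
--             char_count[char] = 1
--
--         if result == "None" and char_count[char] > minimum_count:
--             result = char
--
--     return result
-- ===== SOURCE B (Python) =====
-- def dominant_character_robust(string: str, k: int) -> str:
--     # Index-table algorithm: one grouping pass records each character's occurrence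
--     # positions; a character with more than `need` occurrences first exceeds the
--     # threshold exactly at its (need+1)-th occurrence; return the character whose
--     # crossing position is smallest.
--     need = max(len(string) // k, 0)
--     positions = {}
--     for i, ch in enumerate(string):
--         positions.setdefault(ch, []).append(i)
--     best = None
--     for ch, pos in positions.items():
--         if len(pos) > need and (best is None or pos[need] < best[0]):
--             best = (pos[need], ch)
--     return best[1] if best is not None else "None"
-- ===== Notes on version B (the rewrite author's own statement) =====
-- stated objective: alternative
-- what changed: B replaces A's single pass with a running per-character counter and a result latch by an index-table algorithm: one grouping pass records each character's occurrence positions in a dict, then each character with more than len(string)//k occurrences crosses the threshold exactly at its (threshold+1)-th occurrence, and B returns the character with the smallest such crossing position.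
import Mathlib
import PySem

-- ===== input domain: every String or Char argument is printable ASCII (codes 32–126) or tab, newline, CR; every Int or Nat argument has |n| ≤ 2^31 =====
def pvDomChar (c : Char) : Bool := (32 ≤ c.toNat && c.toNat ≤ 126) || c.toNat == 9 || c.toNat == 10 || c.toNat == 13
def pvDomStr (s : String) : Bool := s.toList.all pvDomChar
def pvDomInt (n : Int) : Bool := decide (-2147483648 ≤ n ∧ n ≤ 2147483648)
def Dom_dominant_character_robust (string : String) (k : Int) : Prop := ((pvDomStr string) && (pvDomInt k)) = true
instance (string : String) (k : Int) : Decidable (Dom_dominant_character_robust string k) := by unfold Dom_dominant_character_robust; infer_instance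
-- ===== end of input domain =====

-- B replaces A's one-pass running counter + result latch by an index-table algorithm
-- (group each character's occurrence positions, then pick the character whose
-- (threshold+1)-th occurrence position is smallest); same return value, not faster.

-- ===== PORT A =====
-- one iteration of A's `for char in string` loop: state = (result, char_count)
def pvAStep (t : Int) (st : String × PySem.Dict Char Int) (c : Char) :
    String × PySem.Dict Char Int :=
  let d := if st.2.contains c then st.2.modify c 0 (· + 1) else st.2.insert c 1
  let r := if st.1 == "None" && decide (d.getD c 0 > t) then String.ofList [c] else st.1
  (r, d)

def dominant_character_robust (string : String) (k : Int) : String :=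
  -- minimum_count = len(string) // k  (Pre_ excludes k = 0, where Python raises ZeroDivisionError)
  let t := PySem.Int.floordiv (string.toList.length : Int) k
  (string.toList.foldl (pvAStep t) ("None", PySem.Dict.empty)).1

-- ===== PORT B =====
-- one iteration of B's `for ch, pos in positions.items()` loop; pos[need] is ported as
-- pyGetD, which is exact under the guard len(pos) > need since need = max(len//k, 0) ≥ 0.
def pvBStep (need : Int) (best : Option (Int × Char)) (it : Char × List Int) :
    Option (Int × Char) :=
  if decide ((it.2.length : Int) > need) &&
     (match best with
      | none => true
      | some b => decide (PySem.List.pyGetD it.2 need 0 < b.1)) then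
    some (PySem.List.pyGetD it.2 need 0, it.1)
  else best


-- the two passes of B: group occurrence positions by character, then min-scan the items
def dominant_character_robust_alt (string : String) (k : Int) : String :=
  let cs := string.toList
  let need := max (PySem.Int.floordiv (cs.length : Int) k) 0
  let positions := (PySem.List.enumerate cs 0).foldl
      (fun d p => d.modify p.2 [] (· ++ [p.1])) PySem.Dict.empty
  let best := positions.items.foldl (pvBStep need) none
  match best with
  | some b => String.ofList [b.2]
  | none => "None"

-- ===== PRECONDITION & SPEC =====
-- Pre_ excludes exactly k = 0, where Python A raises ZeroDivisionError.
def Pre_dominant_character_robust (string : String) (k : Int) : Prop := k ≠ 0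
instance (string : String) (k : Int) : Decidable (Pre_dominant_character_robust string k) := by
  unfold Pre_dominant_character_robust; infer_instance

def pvWitness_dominant_character_robust : String × Int := ("aab", 2)

def Spec_dominant_character_robust (string : String) (k : Int) (out : String) : Prop := out = dominant_character_robust_alt string k
instance (string : String) (k : Int) (out : String) : Decidable (Spec_dominant_character_robust string k out) := by unfold Spec_dominant_character_robust; infer_instance

-- ===== CLAIM (what is proved, stated in full; the proofs are below) =====
def Claim_equal_dominant_character_robust : Prop := ∀ (string : String) (k : Int), Dom_dominant_character_robust string k → Pre_dominant_character_robust string k → Spec_dominant_character_robust string k (dominant_character_robust string k)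

-- ===== LEMMAS AND PROOFS =====

def pvOcc (cs : List Char) (c : Char) (s : Int) : List Int :=
  ((PySem.List.enumerate cs s).filter (fun p => p.2 == c)).map (·.1)
lemma pvOcc_cons (x : Char) (xs : List Char) (c : Char) (s : Int) :
    pvOcc (x :: xs) c s = (if x = c then [s] else []) ++ pvOcc xs c (s + 1) := by
  by_cases h : x = c <;> simp [pvOcc, PySem.List.enumerate_cons, h]

lemma pvOcc_lb (cs : List Char) (c : Char) : ∀ (s : Int), ∀ i ∈ pvOcc cs c s, s ≤ i := by
  induction cs with
  | nil => intro s i hi; simp [pvOcc] at hi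
  | cons x xs ih =>
    intro s i hi
    rw [pvOcc_cons] at hi
    rcases List.mem_append.mp hi with h | h
    · split_ifs at h with hx
      · simp at h; omega
      · simp at h
    · have := ih (s + 1) i h; omega

lemma pvOcc_sorted (cs : List Char) (c : Char) : ∀ (s : Int),
    (pvOcc cs c s).Pairwise (· < ·) := by
  induction cs with
  | nil => intro s; simp [pvOcc]
  | cons x xs ih =>
    intro s
    rw [pvOcc_cons]
    refine List.pairwise_append.mpr ⟨?_, ih (s + 1), ?_⟩
    · split_ifs <;> simp
    · intro a ha b hb
      split_ifs at ha with hx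
      · simp at ha; subst ha
        have := pvOcc_lb xs c _ b hb; omega
      · simp at ha

lemma pvOcc_mem (cs : List Char) (c : Char) : ∀ (s : Int), ∀ i ∈ pvOcc cs c s,
    s ≤ i ∧ i < s + cs.length ∧ cs.getD (i - s).toNat ' ' = c := by
  induction cs with
  | nil => intro s i hi; simp [pvOcc] at hi
  | cons x xs ih =>
    intro s i hi
    rw [pvOcc_cons] at hi
    rcases List.mem_append.mp hi with h | h
    · split_ifs at h with hx
      · simp at h; subst h
        refine ⟨le_refl _, by simp only [List.length_cons]; push_cast; omega, by simp [hx]⟩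
      · simp at h
    · obtain ⟨h1, h2, h3⟩ := ih (s + 1) i h
      refine ⟨by omega, by simp; omega, ?_⟩
      have hpos : (i - s).toNat = (i - (s + 1)).toNat + 1 := by omega
      rw [hpos]
      simpa using h3

lemma pvOcc_countP (cs : List Char) (c : Char) : ∀ (s : Int) (m : Nat),
    (pvOcc cs c s).countP (fun i => decide (i < s + m)) = (cs.take m).count c := by
  induction cs with
  | nil => intro s m; simp [pvOcc]
  | cons x xs ih =>
    intro s m
    cases m with
    | zero =>
      simp only [List.take_zero, List.count_nil, Nat.cast_zero, add_zero]
      rw [List.countP_eq_zero.mpr]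
      intro i hi
      have := pvOcc_lb (x :: xs) c s i hi
      simp; omega
    | succ m' =>
      rw [pvOcc_cons, List.countP_append, List.take_succ_cons, List.count_cons]
      have hih := ih (s + 1) m'
      have harith : (s + 1) + (m' : Int) = s + ((m' + 1 : Nat) : Int) := by push_cast; ring
      rw [harith] at hih
      rw [hih]
      by_cases hx : x = c
      · subst hx
        have h1 : List.countP (fun i => decide (i < s + ((m' + 1 : Nat) : Int))) [s] = 1 := by
          simp only [List.countP_cons, List.countP_nil]
          have hlt : (s : Int) < s + ((m' + 1 : Nat) : Int) := by push_cast; omega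
          simp [decide_eq_true hlt]
        rw [if_pos rfl, h1]
        simp only [beq_self_eq_true, if_pos]
        omega
      · simp [hx]

lemma pvSorted_countP_getElem (l : List Int) :
    l.Pairwise (· < ·) →
    ∀ (j : Nat), j < l.length → l.countP (fun x => decide (x ≤ l.getD j 0)) = j + 1 := by
  induction l with
  | nil => intro _ j h; simp at h
  | cons a r ih =>
    intro hp j h
    have ha : ∀ x ∈ r, a < x := fun x hx => (List.pairwise_cons.mp hp).1 x hx
    have hr : r.Pairwise (· < ·) := (List.pairwise_cons.mp hp).2
    cases j with
    | zero =>
      simp only [List.getD_cons_zero, List.countP_cons, le_refl, decide_true, if_pos]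
      have hz : r.countP (fun x => decide (x ≤ a)) = 0 :=
        List.countP_eq_zero.mpr
          (fun x hx => by simp only [decide_eq_true_eq, not_le]; exact ha x hx)
      omega
    | succ j' =>
      have hj' : j' < r.length := by simpa using h
      simp only [List.getD_cons_succ, List.countP_cons]
      rw [ih hr j' hj']
      have hmem : r.getD j' 0 ∈ r := by
        rw [List.getD_eq_getElem r 0 hj']
        exact List.getElem_mem hj'
      have hle : a ≤ r.getD j' 0 := le_of_lt (ha _ hmem)
      rw [decide_eq_true hle]
      simp

lemma pvSorted_countP_ge (l : List Int) :
    l.Pairwise (· < ·) → ∀ (b : Int) (j : Nat),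
      j + 1 ≤ l.countP (fun x => decide (x ≤ b)) →
      j < l.length ∧ l.getD j 0 ≤ b := by
  induction l with
  | nil => intro _ b j hj; simp at hj
  | cons a r ih =>
    intro hp b j hj
    have ha : ∀ x ∈ r, a < x := fun x hx => (List.pairwise_cons.mp hp).1 x hx
    have hr : r.Pairwise (· < ·) := (List.pairwise_cons.mp hp).2
    by_cases hab : a ≤ b
    · cases j with
      | zero => exact ⟨by simp, by simpa using hab⟩
      | succ j' =>
        rw [List.countP_cons] at hj
        simp [hab] at hj
        obtain ⟨h1, h2⟩ := ih hr b j' (by omega)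
        exact ⟨by simpa using Nat.succ_lt_succ h1, by simpa using h2⟩
    · exfalso
      have hz : r.countP (fun x => decide (x ≤ b)) = 0 := by
        rw [List.countP_eq_zero]
        intro x hx
        simp only [decide_eq_true_eq, not_le]
        have := ha x hx; omega
      rw [List.countP_cons] at hj
      simp [hab, hz] at hj

def pvMin (b : Option (Int × Char)) (x : Int × Char) : Option (Int × Char) :=
  match b with
  | none => some x
  | some p => if x.1 < p.1 then some x else b

lemma pvMin_some (xs : List (Int × Char)) : ∀ (p : Int × Char),
    ∃ q, xs.foldl pvMin (some p) = some q ∧ (q = p ∨ q ∈ xs) ∧ q.1 ≤ p.1 ∧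
      ∀ y ∈ xs, q.1 ≤ y.1 := by
  induction xs with
  | nil => intro p; exact ⟨p, rfl, Or.inl rfl, le_refl _, by simp⟩
  | cons x xs ih =>
    intro p
    by_cases hx : x.1 < p.1
    · obtain ⟨q, h1, h2, h3, h4⟩ := ih x
      refine ⟨q, ?_, ?_, ?_, ?_⟩
      · simpa [pvMin, hx] using h1
      · rcases h2 with h | h
        · exact Or.inr (by simp [h])
        · exact Or.inr (by simp [h])
      · omega
      · intro y hy
        rcases List.mem_cons.mp hy with h | h
        · subst h; exact h3
        · exact h4 y h
    · obtain ⟨q, h1, h2, h3, h4⟩ := ih p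
      refine ⟨q, ?_, ?_, h3, ?_⟩
      · simpa [pvMin, hx] using h1
      · rcases h2 with h | h
        · exact Or.inl h
        · exact Or.inr (by simp [h])
      · intro y hy
        rcases List.mem_cons.mp hy with h | h
        · subst h; omega
        · exact h4 y h

def pvCandOf (need : Int) (it : Char × List Int) : Option (Int × Char) :=
  if (need < (it.2.length : Int)) then some (PySem.List.pyGetD it.2 need 0, it.1) else none

lemma pvB_fold_eq_min (need : Int) (L : List (Char × List Int)) : ∀ (b : Option (Int × Char)),
    L.foldl (pvBStep need) b = (L.filterMap (pvCandOf need)).foldl pvMin b := by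
  induction L with
  | nil => intro b; rfl
  | cons it L ih =>
    intro b
    have hstep : pvBStep need b it =
        match pvCandOf need it with
        | none => b
        | some x => pvMin b x := by
      unfold pvBStep pvCandOf pvMin
      by_cases hlen : need < (it.2.length : Int)
      · rw [if_pos hlen]
        cases b with
        | none => simp [hlen]
        | some p =>
          by_cases hlt : PySem.List.pyGetD it.2 need 0 < p.1
          · simp [hlen, hlt]
          · simp [hlen, hlt]
      · rw [if_neg hlen]
        simp [show ¬ ((it.2.length : Int) > need) from hlen]
    rw [List.foldl_cons, List.filterMap_cons]
    cases hc : pvCandOf need it with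
    | none =>
      rw [hstep, hc]
      exact ih b
    | some x =>
      rw [hstep, hc, List.foldl_cons]
      exact ih _

def pvCross (cs : List Char) (t : Int) (i : Nat) : Bool :=
  decide ((((cs.take (i + 1)).count (cs.getD i ' ')) : Int) > t)

def pvFirst (cs : List Char) (t : Int) : Option Nat :=
  (List.range cs.length).find? (pvCross cs t)

def pvSpec (cs : List Char) (t : Int) : String :=
  match pvFirst cs t with
  | some i => String.ofList [cs.getD i ' ']
  | none => "None"

def pvRef (t : Int) : List Char → List Char → String
  | _, [] => "None"
  | seen, c :: r =>
    if (((seen.count c : Int) + 1 > t)) then String.ofList [c]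
    else pvRef t (seen ++ [c]) r

lemma pvRef_eq_find (t : Int) (rest : List Char) : ∀ (seen : List Char),
    pvRef t seen rest =
      match (List.range rest.length).find?
          (fun j => decide ((((seen ++ rest.take (j + 1)).count (rest.getD j ' ')) : Int) > t)) with
      | some j => String.ofList [rest.getD j ' ']
      | none => "None" := by
  induction rest with
  | nil => intro seen; rfl
  | cons c r ih =>
    intro seen
    rw [List.length_cons, List.range_succ_eq_map, List.find?_cons]
    have h0 : (seen ++ (c :: r).take (0 + 1)).count ((c :: r).getD 0 ' ') = seen.count c + 1 := by
      simp
    by_cases hgt : (seen.count c : Int) + 1 > t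
    · have : (decide ((((seen ++ (c :: r).take (0 + 1)).count ((c :: r).getD 0 ' ')) : Int) > t)) = true := by
        rw [h0]; push_cast; simpa using hgt
      rw [this]
      simp only [pvRef, if_pos hgt]
      rfl
    · have : (decide ((((seen ++ (c :: r).take (0 + 1)).count ((c :: r).getD 0 ' ')) : Int) > t)) = false := by
        rw [h0]; push_cast; simpa using hgt
      rw [this]
      simp only [pvRef, if_neg hgt]
      rw [ih (seen ++ [c])]
      rw [List.find?_map]
      have hpred : ((fun j => decide ((((seen ++ (c :: r).take (j + 1)).count ((c :: r).getD j ' ')) : Int) > t)) ∘ Nat.succ)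
          = (fun j => decide (((((seen ++ [c]) ++ r.take (j + 1)).count (r.getD j ' ')) : Int) > t)) := by
        funext j
        simp only [Function.comp_apply, Nat.succ_eq_add_one, List.take_succ_cons,
          List.getD_cons_succ]
        rw [List.append_cons]
      rw [hpred]
      cases hf : (List.range r.length).find?
          (fun j => decide (((((seen ++ [c]) ++ r.take (j + 1)).count (r.getD j ' ')) : Int) > t)) with
      | none => simp
      | some j => simp

lemma pvRef_eq_spec (t : Int) (cs : List Char) : pvRef t [] cs = pvSpec cs t := by
  rw [pvRef_eq_find]
  unfold pvSpec pvFirst pvCross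
  simp

lemma pvQ1 (cs : List Char) (t need : Int) (hneed : need = max t 0) (c : Char)
    (h : need.toNat < (pvOcc cs c 0).length) :
    0 ≤ (pvOcc cs c 0).getD need.toNat 0 ∧
    ((pvOcc cs c 0).getD need.toNat 0).toNat < cs.length ∧
    cs.getD ((pvOcc cs c 0).getD need.toNat 0).toNat ' ' = c ∧
    pvCross cs t ((pvOcc cs c 0).getD need.toNat 0).toNat = true := by
  set K := (pvOcc cs c 0).getD need.toNat 0 with hK
  have hKmem : K ∈ pvOcc cs c 0 := by
    rw [hK, List.getD_eq_getElem _ 0 h]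
    exact List.getElem_mem h
  obtain ⟨h1, h2, h3⟩ := pvOcc_mem cs c 0 K hKmem
  have hKlt : K.toNat < cs.length := by omega
  have h3' : cs.getD K.toNat ' ' = c := by
    have : (K - 0).toNat = K.toNat := by omega
    rwa [this] at h3
  refine ⟨h1, hKlt, h3', ?_⟩
  have hcount : (cs.take (K.toNat + 1)).count c = need.toNat + 1 := by
    have hc1 := pvOcc_countP cs c 0 (K.toNat + 1)
    have hc2 := pvSorted_countP_getElem (pvOcc cs c 0) (pvOcc_sorted cs c 0) need.toNat h
    rw [← hc1]
    rw [← hc2, ← hK]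
    apply List.countP_congr
    intro x hx
    have h0K : (0 : Int) + ((K.toNat + 1 : Nat) : Int) = K + 1 := by push_cast; omega
    rw [h0K]
    have hiff : (x < K + 1) ↔ (x ≤ K) := by omega
    simpa using decide_eq_decide.mpr hiff
  unfold pvCross
  rw [h3', hcount]
  simp only [decide_eq_true_eq]
  push_cast
  omega

lemma pvQ2 (cs : List Char) (t need : Int) (hneed : need = max t 0) (i : Nat)
    (hi : i < cs.length) (hc : pvCross cs t i = true) :
    need.toNat < (pvOcc cs (cs.getD i ' ') 0).length ∧
    (pvOcc cs (cs.getD i ' ') 0).getD need.toNat 0 ≤ (i : Int) := by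
  set c := cs.getD i ' ' with hcdef
  unfold pvCross at hc
  rw [← hcdef] at hc
  simp only [decide_eq_true_eq] at hc
  have hmem : c ∈ cs.take (i + 1) := by
    have hlen : i < (cs.take (i + 1)).length := by simp [List.length_take]; omega
    have : (cs.take (i + 1))[i] = cs[i] := List.getElem_take
    have hco : c = (cs.take (i + 1))[i] := by
      rw [this, hcdef, List.getD_eq_getElem _ _ hi]
    rw [hco]
    exact List.getElem_mem hlen
  have hone : 1 ≤ (cs.take (i + 1)).count c := List.count_pos_iff.mpr hmem
  have hge : need.toNat + 1 ≤ (cs.take (i + 1)).count c := by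
    subst hneed; omega
  have hcp : (pvOcc cs c 0).countP (fun x => decide (x ≤ (i : Int))) =
      (cs.take (i + 1)).count c := by
    rw [← pvOcc_countP cs c 0 (i + 1)]
    apply List.countP_congr
    intro x hx
    have h0i : (0 : Int) + ((i + 1 : Nat) : Int) = (i : Int) + 1 := by push_cast; omega
    rw [h0i]
    have hiff : (x < (i : Int) + 1) ↔ (x ≤ (i : Int)) := by omega
    simpa using decide_eq_decide.mpr hiff
  exact pvSorted_countP_ge (pvOcc cs c 0) (pvOcc_sorted cs c 0) (i : Int) need.toNat
    (by omega)

lemma pvB_eq_spec (s : String) (k : Int) :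
    dominant_character_robust_alt s k =
      pvSpec s.toList (PySem.Int.floordiv ((s.toList.length : Int)) k) := by
  set cs := s.toList with hcs
  set t := PySem.Int.floordiv ((cs.length : Int)) k with ht
  set need := max t 0 with hneed
  have hneed0 : 0 ≤ need := le_max_right _ _
  have hneedNat : ((need.toNat : Nat) : Int) = need := Int.toNat_of_nonneg hneed0
  set positions := (PySem.List.enumerate cs 0).foldl
      (fun d p => d.modify p.2 [] (· ++ [p.1])) PySem.Dict.empty with hpos
  -- (1) the dict's value at any character is its occurrence-position list
  have hval : ∀ c, positions.getD c [] = pvOcc cs c 0 := by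
    intro c
    have hswap : positions =
        ((PySem.List.enumerate cs 0).map Prod.swap).foldl
          (fun d p => d.modify p.1 [] (· ++ [p.2])) PySem.Dict.empty := by
      rw [List.foldl_map]
      rfl
    rw [hswap, PySem.Dict.getD_foldl_modify_append]
    simp only [PySem.Dict.getD_empty, List.nil_append, List.filter_map, List.map_map]
    unfold pvOcc
    rfl
  -- (2) the dict's keys are the distinct characters, in order
  have hkeys : positions.keys = PySem.Set.ofList cs := by
    rw [hpos, PySem.Dict.keys_foldl_modify_key (PySem.List.enumerate cs 0) (fun p => p.2) []
      (fun _ p => (· ++ [p.1])) PySem.Dict.empty]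
    rw [PySem.List.map_snd_enumerate]
    simp [PySem.Set.update_nil_left]
  have hnodup : positions.keys.Nodup := by
    rw [hpos]
    exact PySem.Dict.nodup_keys_foldl_modify_key _ _ _ _ _ (by simp)
  -- (3) items as a map over the distinct characters
  have hitems : positions.items = (PySem.Set.ofList cs).map (fun c => (c, pvOcc cs c 0)) := by
    rw [PySem.Dict.items_eq_map_keys positions hnodup [], hkeys]
    exact List.map_congr_left (fun c _ => by rw [hval c])
  -- (4) the fold over items is the min-scan over the candidate list
  have hfold : positions.items.foldl (pvBStep need) none =
      ((PySem.Set.ofList cs).filterMap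
        (fun c => pvCandOf need (c, pvOcc cs c 0))).foldl pvMin none := by
    rw [pvB_fold_eq_min, hitems, List.filterMap_map]
    rfl
  have halt : dominant_character_robust_alt s k =
      match positions.items.foldl (pvBStep need) none with
      | some b => String.ofList [b.2]
      | none => "None" := rfl
  rw [halt, hfold]
  -- candidate characterisation
  have hcand_mem : ∀ x ∈ (PySem.Set.ofList cs).filterMap
      (fun c => pvCandOf need (c, pvOcc cs c 0)),
      need.toNat < (pvOcc cs x.2 0).length ∧ x.1 = (pvOcc cs x.2 0).getD need.toNat 0 := by
    intro x hx
    obtain ⟨c, _, hc⟩ := List.mem_filterMap.mp hx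
    unfold pvCandOf at hc
    by_cases hlen : need < (((c, pvOcc cs c 0).2.length : Nat) : Int)
    · rw [if_pos hlen] at hc
      have hlen2 : need < ((pvOcc cs c 0).length : Int) := by simpa using hlen
      have hlen' : need.toNat < (pvOcc cs c 0).length := by omega
      have hget : PySem.List.pyGetD (pvOcc cs c 0) need 0 = (pvOcc cs c 0).getD need.toNat 0 := by
        rw [PySem.List.pyGetD_eq_getElem _ _ hneed0 (by simpa using hlen2),
          List.getD_eq_getElem _ 0 hlen']
      simp only [Option.some_inj] at hc
      subst hc
      exact ⟨hlen', by simpa using hget⟩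
    · rw [if_neg hlen] at hc
      exact absurd hc (by simp)
  cases hf : pvFirst cs t with
  | none =>
    -- no character ever crosses the threshold: the candidate list is empty
    have hnone : ∀ i ∈ List.range cs.length, ¬ pvCross cs t i = true :=
      List.find?_eq_none.mp hf
    have hnil : (PySem.Set.ofList cs).filterMap
        (fun c => pvCandOf need (c, pvOcc cs c 0)) = [] := by
      rw [List.filterMap_eq_nil_iff]
      intro c _
      unfold pvCandOf
      rw [if_neg]
      intro hlen
      have hlen2 : need < ((pvOcc cs c 0).length : Int) := by simpa using hlen
      have hlen' : need.toNat < (pvOcc cs c 0).length := by omega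
      obtain ⟨_, h2, _, h4⟩ := pvQ1 cs t need hneed c hlen'
      exact hnone _ (List.mem_range.mpr h2) h4
    rw [hnil]
    simp [pvSpec, hf]
  | some i₀ =>
    obtain ⟨hcross₀, m, hm, hval₀, hmin₀⟩ := List.find?_eq_some_iff_getElem.mp hf
    have hi₀ : i₀ < cs.length := by
      have : (List.range cs.length)[m] = m := List.getElem_range hm
      rw [this] at hval₀; subst hval₀; simpa using hm
    have hmin : ∀ j, j < i₀ → ¬ pvCross cs t j = true := by
      intro j hj
      have : (List.range cs.length)[m] = m := List.getElem_range hm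
      rw [this] at hval₀; subst hval₀
      have hjm := hmin₀ j hj
      simpa using hjm
    set c₀ := cs.getD i₀ ' ' with hc₀
    obtain ⟨hq2len, hq2le⟩ := pvQ2 cs t need hneed i₀ hi₀ hcross₀
    rw [← hc₀] at hq2len hq2le
    obtain ⟨hk0, hk1, hk2, hk3⟩ := pvQ1 cs t need hneed c₀ hq2len
    set K₀ := (pvOcc cs c₀ 0).getD need.toNat 0 with hK₀
    have hKi : K₀ = (i₀ : Int) := by
      have h1 : ¬ K₀.toNat < i₀ := fun hlt => hmin _ hlt hk3
      omega
    -- the candidate of c₀ is (i₀, c₀)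
    have hx₀ : ((i₀ : Int), c₀) ∈ (PySem.Set.ofList cs).filterMap
        (fun c => pvCandOf need (c, pvOcc cs c 0)) := by
      apply List.mem_filterMap.mpr
      refine ⟨c₀, ?_, ?_⟩
      · apply (PySem.Set.mem_ofList _ _).mpr
        rw [hc₀, List.getD_eq_getElem _ _ hi₀]
        exact List.getElem_mem hi₀
      · unfold pvCandOf
        show (if need < ((pvOcc cs c₀ 0).length : Int) then
            some (PySem.List.pyGetD (pvOcc cs c₀ 0) need 0, c₀) else none) = some ((i₀ : Int), c₀)
        rw [if_pos (show need < ((pvOcc cs c₀ 0).length : Int) by omega)]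
        have hget : PySem.List.pyGetD (pvOcc cs c₀ 0) need 0 = K₀ := by
          rw [PySem.List.pyGetD_eq_getElem _ _ hneed0 (by omega),
            hK₀, List.getD_eq_getElem _ 0 hq2len]
        rw [hget, hKi]
    -- every candidate's key is at least i₀
    have hlb : ∀ x ∈ (PySem.Set.ofList cs).filterMap
        (fun c => pvCandOf need (c, pvOcc cs c 0)), (i₀ : Int) ≤ x.1 := by
      intro x hx
      obtain ⟨hxlen, hxkey⟩ := hcand_mem x hx
      obtain ⟨hx0, hx1, hx2, hx3⟩ := pvQ1 cs t need hneed x.2 hxlen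
      have : ¬ ((pvOcc cs x.2 0).getD need.toNat 0).toNat < i₀ :=
        fun hlt => hmin _ hlt hx3
      omega
    cases hcl : (PySem.Set.ofList cs).filterMap
        (fun c => pvCandOf need (c, pvOcc cs c 0)) with
    | nil => rw [hcl] at hx₀; simp at hx₀
    | cons y ys =>
      have hfold2 : (y :: ys).foldl pvMin none = ys.foldl pvMin (some y) := rfl
      obtain ⟨q, hq1, hq2, hq3, hq4⟩ := pvMin_some ys y
      rw [hfold2, hq1]
      have hqmem : q ∈ y :: ys := by
        rcases hq2 with h | h
        · simp [h]
        · exact List.mem_cons_of_mem _ h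
      have hqmem' : q ∈ (PySem.Set.ofList cs).filterMap
          (fun c => pvCandOf need (c, pvOcc cs c 0)) := by rw [hcl]; exact hqmem
      -- q's key equals i₀
      have hqlb : (i₀ : Int) ≤ q.1 := hlb q hqmem'
      have hqub : q.1 ≤ (i₀ : Int) := by
        rw [hcl] at hx₀
        rcases List.mem_cons.mp hx₀ with h | h
        · rw [← h] at hq3; exact hq3
        · exact hq4 _ h
      have hqkey : q.1 = (i₀ : Int) := le_antisymm hqub hqlb
      -- hence q's character is c₀
      obtain ⟨hqlen, hqk⟩ := hcand_mem q hqmem'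
      obtain ⟨_, _, hqc, _⟩ := pvQ1 cs t need hneed q.2 hqlen
      have hqchar : q.2 = c₀ := by
        rw [← hqk] at hqc
        rw [hqkey] at hqc
        rw [hc₀, ← hqc]
        simp
      show String.ofList [q.2] = pvSpec cs t
      rw [hqchar]
      simp [pvSpec, hf, hc₀]

-- ---------- A-side lemmas ----------
lemma pvSingle_ne_none (c : Char) : String.ofList [c] ≠ "None" := by
  intro h
  have := congrArg String.toList h
  simp [String.toList_ofList] at this

-- once result ≠ "None", A's loop never changes it
lemma pvA_keeps (t : Int) (rest : List Char) (r : String) (hr : r ≠ "None") (d : PySem.Dict Char Int) :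
    (rest.foldl (pvAStep t) (r, d)).1 = r := by
  induction rest generalizing d with
  | nil => rfl
  | cons c rest ih =>
    simp only [List.foldl_cons, pvAStep]
    rw [if_neg (by simp [hr])]
    exact ih _

-- invariant linking A's dict to the processed prefix
lemma pvA_loop (t : Int) (rest : List Char) : ∀ (seen : List Char) (d : PySem.Dict Char Int),
    (∀ x, d.getD x 0 = (seen.count x : Int)) →
    (∀ x, d.contains x = true ↔ x ∈ seen) →
    (rest.foldl (pvAStep t) ("None", d)).1 = pvRef t seen rest := by
  induction rest with
  | nil => intro seen d _ _; rfl
  | cons c rest ih =>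
    intro seen d hcnt hmem
    set d' := if d.contains c then d.modify c 0 (· + 1) else d.insert c 1 with hd'
    have hc' : ∀ x, d'.getD x 0 = ((seen ++ [c]).count x : Int) := by
      intro x
      by_cases hx : x = c
      · subst hx
        by_cases h : d.contains x
        · simp [hd', h, PySem.Dict.getD_modify_self, hcnt x, List.count_append]
        · have hx0 : seen.count x = 0 := by
            by_contra h0
            exact h ((hmem x).2 (List.count_pos_iff.mp (Nat.pos_of_ne_zero h0)))
          simp [hd', h, PySem.Dict.getD_insert_self, hx0, List.count_append]
      · have hx' : ¬ c = x := fun e => hx e.symm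
        by_cases h : d.contains c
        · rw [hd', if_pos h, PySem.Dict.getD_modify_of_ne _ _ _ hx, hcnt x]
          simp [List.count_append, hx']
        · rw [hd', if_neg h, PySem.Dict.getD_insert_of_ne _ _ _ hx, hcnt x]
          simp [List.count_append, hx']
    have hm' : ∀ x, d'.contains x = true ↔ x ∈ seen ++ [c] := by
      intro x
      by_cases h : d.contains c <;>
        simp [hd', h, PySem.Dict.contains_modify, PySem.Dict.contains_insert, hmem x,
          List.mem_append, or_comm]
    have hcond : d'.getD c 0 = (seen.count c : Int) + 1 := by
      rw [hc' c]; simp [List.count_append]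
    simp only [List.foldl_cons, pvRef]
    have hstep : pvAStep t ("None", d) c =
        ((if ((seen.count c : Int) + 1 > t) then String.ofList [c] else "None"), d') := by
      simp [pvAStep, ← hd', hcond]
    rw [hstep]
    by_cases hgt : (seen.count c : Int) + 1 > t
    · rw [if_pos hgt, if_pos hgt]
      exact pvA_keeps t rest _ (pvSingle_ne_none c) _
    · rw [if_neg hgt, if_neg hgt]
      exact ih (seen ++ [c]) d' hc' hm'

lemma pvA_eq_spec (s : String) (k : Int) :
    dominant_character_robust s k =
      pvSpec s.toList (PySem.Int.floordiv ((s.toList.length : Int)) k) := by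
  unfold dominant_character_robust
  rw [pvA_loop _ _ [] PySem.Dict.empty (by intro x; rfl) (by intro x; simp)]
  exact pvRef_eq_spec _ _

-- ===== VERDICT (by name: the statement is the Claim_ definition above) =====
theorem dominant_character_robust_spec : Claim_equal_dominant_character_robust := by
  intro string k _ _
  unfold Spec_dominant_character_robust
  rw [pvA_eq_spec, pvB_eq_spec]
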